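-- pv_equiv track=rewrite | github.com/lpp-crypto/sboxU | sboxU/utils.py | get_block_lengths
-- ===== SOURCE A (Python) =====
-- def get_block_lengths(s):
--     """Return the number of bits `n` in the input and `m` in the
--     output of `s`
--
--     """
--     # finding n
--     n = 1
--     while (1 << n) < len(s):
--         n += 1
--     if 2**n != len(s):
--         raise Exception("wrong S-box length")
--     else:
--         # finding m
--         mask = 1
--         m = 1
--         for x in s:
--             while (x != (x & mask)):
--                 mask = (mask << 1) | 1
--                 m += 1
--         return n, m
-- ===== SOURCE B (Python) =====
-- def get_block_lengths(s):
--     """Return the number of bits `n` in the input and `m` in the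
--     output of `s`
--
--     """
--     n = len(s).bit_length() - 1
--     if len(s) < 2 or 2**n != len(s):
--         raise Exception("wrong S-box length")
--     acc = 0
--     for x in s:
--         acc |= x
--     m = max(acc.bit_length(), 1)
--     return n, m
-- ===== Notes on version B (the rewrite author's own statement) =====
-- stated objective: simpler
-- what changed: n is computed by the closed form len(s).bit_length()-1 instead of A's counting while-loop, and m by a single bitwise-OR accumulator over all elements followed by one bit_length, instead of A's per-element inner while-loop growing a mask.
-- outside the precondition, e.g. on get_block_lengths([-1, 0]): A does not finish within the time limit, B returns (1, 1)
import Mathlib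
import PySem

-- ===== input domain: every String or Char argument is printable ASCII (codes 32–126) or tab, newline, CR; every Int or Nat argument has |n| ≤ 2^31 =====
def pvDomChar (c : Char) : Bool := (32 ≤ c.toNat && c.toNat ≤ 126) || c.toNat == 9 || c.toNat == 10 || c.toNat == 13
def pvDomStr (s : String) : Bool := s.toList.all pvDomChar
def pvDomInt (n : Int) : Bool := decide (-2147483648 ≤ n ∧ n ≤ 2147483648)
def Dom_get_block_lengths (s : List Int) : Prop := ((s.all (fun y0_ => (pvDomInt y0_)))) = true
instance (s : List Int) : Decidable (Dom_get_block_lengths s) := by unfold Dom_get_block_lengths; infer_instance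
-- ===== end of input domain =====

-- B computes n by the closed form bit_length(len)-1 and m via one bitwise-OR accumulator,
-- replacing A's counting while-loop and per-element mask-growing inner loop (objective: simpler).


-- ===== PORT A =====
-- A's `n = 1; while (1 << n) < len(s): n += 1`
def pvFindN (len n : Nat) : Nat :=
  if 2 ^ n < len then pvFindN len (n + 1) else n
  termination_by len - 2 ^ n
  decreasing_by
    have h1 : 2 ^ n < 2 ^ (n + 1) := Nat.pow_lt_pow_succ (by norm_num)
    omega

-- A's inner `while x != (x & mask): mask = (mask << 1) | 1; m += 1`.
-- The fuel only makes the recursion total: 64 iterations suffice for every x with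
-- 0 ≤ x ≤ 2^31 (Dom); if x < 0 the Python loop never terminates (those inputs are
-- outside Pre_). Int.land/Int.lor/Int.shiftLeft are Python's &, |, << on ints.
def pvGrow (fuel : Nat) (x mask m : Int) : Int × Int :=
  match fuel with
  | 0 => (mask, m)
  | fuel + 1 =>
      if x ≠ Int.land x mask then
        pvGrow fuel x (Int.lor (Int.shiftLeft mask 1) 1) (m + 1)
      else (mask, m)

def get_block_lengths (s : List Int) : Int × Int :=
  let n := pvFindN s.length 1
  if 2 ^ n ≠ s.length then (0, 0)  -- Python raises Exception("wrong S-box length"); excluded by Pre_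
  else
    let st := s.foldl (fun (st : Int × Int) x => pvGrow 64 x st.1 st.2) (1, 1)
    ((n : Int), st.2)

-- ===== PORT B =====
-- Python's int.bit_length on a natural number
def pvBitLength (k : Nat) : Nat :=
  if k = 0 then 0 else pvBitLength (k / 2) + 1
  termination_by k
  decreasing_by omega

def get_block_lengths_alt (s : List Int) : Int × Int :=
  let L := s.length
  let n := pvBitLength L - 1
  if L < 2 ∨ 2 ^ n ≠ L then (0, 0)  -- Python raises Exception("wrong S-box length"); excluded by Pre_
  else
    let acc := s.foldl (fun a x => Int.lor a x) 0
    ((n : Int), ((max (pvBitLength acc.natAbs) 1 : Nat) : Int))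

-- ===== PRECONDITION & SPEC =====
-- Pre_ excludes lengths that are not a power of two ≥ 2 (the Python A raises
-- Exception("wrong S-box length") there, and so does B) and lists with a negative
-- entry (A's inner while-loop never terminates on those, so A returns nothing).
def Pre_get_block_lengths (s : List Int) : Prop :=
  2 ≤ s.length ∧ s.length = 2 ^ Nat.log2 s.length ∧ ∀ x ∈ s, 0 ≤ x
instance (s : List Int) : Decidable (Pre_get_block_lengths s) := by
  unfold Pre_get_block_lengths; infer_instance

def pvWitness_get_block_lengths : List Int := [0, 1]

def Spec_get_block_lengths (s : List Int) (out : Int × Int) : Prop := out = get_block_lengths_alt s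
instance (s : List Int) (out : Int × Int) : Decidable (Spec_get_block_lengths s out) := by
  unfold Spec_get_block_lengths; infer_instance

-- ===== CLAIM (what is proved, stated in full; the proofs are below) =====
def Claim_equal_get_block_lengths : Prop :=
  ∀ (s : List Int), Dom_get_block_lengths s → Pre_get_block_lengths s →
    Spec_get_block_lengths s (get_block_lengths s)

-- ===== LEMMAS AND PROOFS =====

theorem pvBitLength_le (a : Nat) : ∀ k, pvBitLength a ≤ k ↔ a < 2 ^ k := by
  induction a using Nat.strong_induction_on with
  | _ a ih =>
    intro k
    unfold pvBitLength
    split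
    · rename_i h0
      subst h0
      exact iff_of_true (Nat.zero_le k) (Nat.two_pow_pos k)
    · rename_i ha
      cases k with
      | zero => exact iff_of_false (by omega) (by omega)
      | succ k =>
        have h := ih (a / 2) (by omega) k
        have hp : (0:Nat) < 2 ^ k := Nat.two_pow_pos k
        rw [pow_succ]
        omega

theorem pvBitLength_pow (k : Nat) : pvBitLength (2 ^ k) = k + 1 := by
  have h1 : pvBitLength (2 ^ k) ≤ k + 1 :=
    (pvBitLength_le _ _).mpr (Nat.pow_lt_pow_succ (by norm_num))
  have h2 : ¬ pvBitLength (2 ^ k) ≤ k := by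
    rw [pvBitLength_le]; omega
  omega

theorem pvBitLength_mono {a b : Nat} (h : a ≤ b) : pvBitLength a ≤ pvBitLength b := by
  rw [pvBitLength_le]
  exact lt_of_le_of_lt h (by
    have := (pvBitLength_le b (pvBitLength b)).mp le_rfl
    exact this)

theorem pvBitLength_lor (a b : Nat) : pvBitLength (a ||| b) = max (pvBitLength a) (pvBitLength b) := by
  apply le_antisymm
  · rw [pvBitLength_le]
    have ha : a < 2 ^ max (pvBitLength a) (pvBitLength b) := by
      rw [← pvBitLength_le]; exact le_max_left _ _
    have hb : b < 2 ^ max (pvBitLength a) (pvBitLength b) := by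
      rw [← pvBitLength_le]; exact le_max_right _ _
    exact Nat.bitwise_lt_two_pow ha hb
  · apply max_le
    · exact pvBitLength_mono Nat.left_le_or
    · exact pvBitLength_mono (Nat.lor_comm a b ▸ Nat.left_le_or)

theorem pvMaskStep (t : Nat) :
    Int.lor (Int.shiftLeft (((2 ^ t - 1 : Nat) : Int)) 1) 1 = ((2 ^ (t + 1) - 1 : Nat) : Int) := by
  have h1 : Int.shiftLeft (((2 ^ t - 1 : Nat) : Int)) 1 = (((2 ^ t - 1) <<< 1 : Nat) : Int) := rfl
  have h2 : Int.lor ((((2 ^ t - 1) <<< 1 : Nat)) : Int) ((1 : Nat) : Int)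
      = ((((2 ^ t - 1) <<< 1 : Nat) ||| 1 : Nat) : Int) := rfl
  have h3 : ((2 ^ t - 1) <<< 1 : Nat) ||| 1 = 2 ^ (t + 1) - 1 := by
    have hs : ((2 ^ t - 1) <<< 1 : Nat) = 2 * (2 ^ t - 1) := by
      rw [Nat.shiftLeft_eq]; ring
    have hb : 2 * (2 ^ t - 1) ||| 1 = 2 * (2 ^ t - 1) + 1 := by
      have h1 : 2 * (2 ^ t - 1) = Nat.bit false (2 ^ t - 1) := by simp [Nat.bit]
      have h2 : (1 : Nat) = Nat.bit true 0 := by simp [Nat.bit]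
      rw [h1, h2, Nat.lor_bit]
      simp [Nat.bit]
    have hp : (0:Nat) < 2 ^ t := Nat.two_pow_pos t
    rw [hs, hb, pow_succ]
    omega
  rw [h1]
  show Int.lor ((((2 ^ t - 1) <<< 1 : Nat)) : Int) ((1 : Nat) : Int) = _
  rw [h2, h3]

theorem pvGrow_eq : ∀ (fuel : Nat) (a t : Nat), 1 ≤ t → pvBitLength a ≤ t + fuel →
    pvGrow fuel (a : Int) ((2 ^ t - 1 : Nat) : Int) (t : Int)
      = (((2 ^ max t (pvBitLength a) - 1 : Nat) : Int), ((max t (pvBitLength a) : Nat) : Int)) := by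
  intro fuel
  induction fuel with
  | zero =>
    intro a t ht hbl
    have : max t (pvBitLength a) = t := by omega
    simp [pvGrow, this]
  | succ fuel ih =>
    intro a t ht hbl
    have hgrow : pvGrow (fuel + 1) (a : Int) ((2 ^ t - 1 : Nat) : Int) (t : Int)
        = if (a : Int) ≠ Int.land (a : Int) ((2 ^ t - 1 : Nat) : Int) then
            pvGrow fuel (a : Int) (Int.lor (Int.shiftLeft ((2 ^ t - 1 : Nat) : Int) 1) 1) ((t : Int) + 1)
          else (((2 ^ t - 1 : Nat) : Int), (t : Int)) := rfl
    have hand : Int.land (a : Int) ((2 ^ t - 1 : Nat) : Int) = ((a &&& (2 ^ t - 1) : Nat) : Int) := rfl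
    have hmod : (a &&& (2 ^ t - 1) : Nat) = a % 2 ^ t := Nat.and_two_pow_sub_one_eq_mod a t
    by_cases hc : a < 2 ^ t
    · have hbt : pvBitLength a ≤ t := (pvBitLength_le _ _).mpr hc
      have hmax : max t (pvBitLength a) = t := by omega
      have heq : (a : Int) = Int.land (a : Int) ((2 ^ t - 1 : Nat) : Int) := by
        rw [hand, hmod, Nat.mod_eq_of_lt hc]
      rw [hgrow, if_neg (not_not_intro heq), hmax]
    · have hne : (a : Int) ≠ Int.land (a : Int) ((2 ^ t - 1 : Nat) : Int) := by
        rw [hand, hmod]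
        intro h
        have h2 : a = a % 2 ^ t := by exact_mod_cast h
        have h3 := Nat.mod_lt a (Nat.two_pow_pos t)
        omega
      have hbt : ¬ pvBitLength a ≤ t := by rw [pvBitLength_le]; omega
      rw [hgrow, if_pos hne, pvMaskStep]
      have hcast : ((t : Int) + 1) = (((t + 1 : Nat)) : Int) := by push_cast; ring
      rw [hcast, ih a (t + 1) (by omega) (by omega)]
      have hmx : max (t + 1) (pvBitLength a) = max t (pvBitLength a) := by omega
      rw [hmx]

-- A's fold, on nonnegative small entries, tracks (2^T - 1, T) with T the running max of bit lengths
theorem pvFoldA : ∀ (l : List Int) (t : Nat), 1 ≤ t →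
    (∀ x ∈ l, 0 ≤ x ∧ x ≤ 2147483648) →
    l.foldl (fun (st : Int × Int) x => pvGrow 64 x st.1 st.2) (((2 ^ t - 1 : Nat) : Int), (t : Int))
      = (((2 ^ (l.foldl (fun (u : Nat) x => max u (pvBitLength x.toNat)) t) - 1 : Nat) : Int),
         ((l.foldl (fun (u : Nat) x => max u (pvBitLength x.toNat)) t : Nat) : Int)) := by
  intro l
  induction l with
  | nil => intro t ht _; simp
  | cons x xs ih =>
    intro t ht hx
    have hx0 : 0 ≤ x := (hx x (by simp)).1
    have hxb : x.toNat < 2 ^ 32 := by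
      have := (hx x (by simp)).2
      omega
    have hbl : pvBitLength x.toNat ≤ 32 := (pvBitLength_le _ _).mpr hxb
    have hxc : (x.toNat : Int) = x := Int.toNat_of_nonneg hx0
    simp only [List.foldl_cons]
    rw [← hxc, pvGrow_eq 64 x.toNat t ht (by omega)]
    exact ih (max t (pvBitLength x.toNat)) (by omega) (fun y hy => hx y (by simp [hy]))

-- B's OR-fold over nonnegative ints is the cast of the OR-fold over their toNats
theorem pvFoldOr : ∀ (l : List Int) (c : Nat), (∀ x ∈ l, 0 ≤ x) →
    l.foldl (fun a x => Int.lor a x) ((c : Nat) : Int)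
      = (((l.map Int.toNat).foldl (fun a x => a ||| x) c : Nat) : Int) := by
  intro l
  induction l with
  | nil => intro c _; simp
  | cons x xs ih =>
    intro c hx
    have hx0 : 0 ≤ x := hx x (by simp)
    have hxc : (x.toNat : Int) = x := Int.toNat_of_nonneg hx0
    simp only [List.foldl_cons, List.map_cons]
    rw [← hxc]
    have : Int.lor ((c : Nat) : Int) ((x.toNat : Nat) : Int) = ((c ||| x.toNat : Nat) : Int) := rfl
    rw [this]
    exact ih _ (fun y hy => hx y (by simp [hy]))

-- running max of bit lengths = bit length of the OR-fold
theorem pvFoldMax : ∀ (l : List Nat) (u c : Nat),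
    l.foldl (fun m x => max m (pvBitLength x)) (max u (pvBitLength c))
      = max u (pvBitLength (l.foldl (fun a x => a ||| x) c)) := by
  intro l
  induction l with
  | nil => intro u c; simp
  | cons x xs ih =>
    intro u c
    simp only [List.foldl_cons]
    have : max (max u (pvBitLength c)) (pvBitLength x) = max u (pvBitLength (c ||| x)) := by
      rw [pvBitLength_lor]; omega
    rw [this]
    exact ih u (c ||| x)

theorem pvFindN_pow : ∀ (d k n : Nat), 1 ≤ n → n + d = k → pvFindN (2 ^ k) n = k := by
  intro d
  induction d with
  | zero =>
    intro k n _ h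
    subst h
    unfold pvFindN
    simp
  | succ d ih =>
    intro k n hn h
    have hlt : 2 ^ n < 2 ^ k := Nat.pow_lt_pow_right (by norm_num) (by omega)
    unfold pvFindN
    rw [if_pos hlt]
    exact ih k (n + 1) (by omega) (by omega)

-- ===== VERDICT (by name: the statement is the Claim_ definition above) =====
theorem get_block_lengths_spec : Claim_equal_get_block_lengths := by
  intro s hdom hpre
  obtain ⟨hlen, hpow, hpos⟩ := hpre
  unfold Spec_get_block_lengths
  set k := Nat.log2 s.length with hk
  have hk1 : 1 ≤ k := by
    rcases Nat.eq_zero_or_pos k with h0 | h1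
    · rw [h0, pow_zero] at hpow; omega
    · exact h1
  have hdombd : ∀ x ∈ s, 0 ≤ x ∧ x ≤ 2147483648 := by
    intro x hx
    have hd := List.all_eq_true.mp hdom x hx
    simp only [pvDomInt, decide_eq_true_eq] at hd
    exact ⟨hpos x hx, hd.2⟩
  -- A's value
  have hA : get_block_lengths s
      = ((k : Int), (((s.map Int.toNat).foldl (fun (u : Nat) x => max u (pvBitLength x)) 1 : Nat) : Int)) := by
    unfold get_block_lengths
    simp only [hpow]
    rw [pvFindN_pow (k - 1) k 1 (le_refl 1) (by omega)]
    rw [if_neg (by simp)]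
    have h1 : ((1 : Int), (1 : Int)) = (((2 ^ 1 - 1 : Nat) : Int), ((1 : Nat) : Int)) := by norm_num
    rw [h1, pvFoldA s 1 (le_refl 1) hdombd]
    simp [List.foldl_map]
  -- B's value
  have hB : get_block_lengths_alt s
      = ((k : Int), ((max 1 (pvBitLength ((s.map Int.toNat).foldl (fun a x => a ||| x) 0)) : Nat) : Int)) := by
    unfold get_block_lengths_alt
    simp only [hpow]
    rw [pvBitLength_pow, Nat.add_sub_cancel]
    have h2k : 2 ≤ 2 ^ k := by
      calc (2:Nat) = 2 ^ 1 := (pow_one 2).symm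
      _ ≤ 2 ^ k := Nat.pow_le_pow_right (by norm_num) hk1
    rw [if_neg (by push Not; exact ⟨by omega, rfl⟩)]
    have hOr := pvFoldOr s 0 hpos
    rw [Nat.cast_zero] at hOr
    rw [hOr]
    simp [Nat.max_comm]
  rw [hA, hB]
  have hbl0 : pvBitLength 0 = 0 := by unfold pvBitLength; simp
  have hfm := pvFoldMax (s.map Int.toNat) 1 0
  rw [hbl0] at hfm
  norm_num at hfm
  rw [hfm]
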